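-- pv_equiv track=rewrite | github.com/dipakmeher/90DaysOfCoding | Day54_11302022/0_Practise/20230804/beauty.py | beautyOfArray
-- ===== SOURCE A (Python) =====
-- def beautyOfArray(arr, c, n):
--     if(n == 0):
--         return 0
--     if(arr[n-1] == n):
--         ans = 1+beautyOfArray(arr, c, n-1)
--         return ans
--     else:
--         arr2 = arr[:]
--         arr2.pop(n-1)
--         ans1 = max(beautyOfArray(arr, c, n-1), beautyOfArray(arr2,c,len(arr2)))
--         return ans1
-- ===== SOURCE B (Python) =====
-- def beautyOfArray(arr, c, n):
--     cache = {}
--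
--     def go(a, m):
--         if m == 0:
--             return 0
--         key = (tuple(a), m)
--         hit = cache.get(key)
--         if hit is not None:
--             return hit
--         if a[m - 1] == m:
--             res = 1 + go(a, m - 1)
--         else:
--             a2 = a[:m - 1] + a[m:]
--             res = max(go(a, m - 1), go(a2, len(a2)))
--         cache[key] = res
--         return res
--
--     return go(list(arr), n)
-- ===== Notes on version B (the rewrite author's own statement) =====
-- stated objective: faster
-- what changed: Replaces the naive exponential branching recursion by top-down dynamic programming: the same recurrence is evaluated at most once per distinct (array, n) state through a memo dictionary threaded through the recursion.
import Mathlib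
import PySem

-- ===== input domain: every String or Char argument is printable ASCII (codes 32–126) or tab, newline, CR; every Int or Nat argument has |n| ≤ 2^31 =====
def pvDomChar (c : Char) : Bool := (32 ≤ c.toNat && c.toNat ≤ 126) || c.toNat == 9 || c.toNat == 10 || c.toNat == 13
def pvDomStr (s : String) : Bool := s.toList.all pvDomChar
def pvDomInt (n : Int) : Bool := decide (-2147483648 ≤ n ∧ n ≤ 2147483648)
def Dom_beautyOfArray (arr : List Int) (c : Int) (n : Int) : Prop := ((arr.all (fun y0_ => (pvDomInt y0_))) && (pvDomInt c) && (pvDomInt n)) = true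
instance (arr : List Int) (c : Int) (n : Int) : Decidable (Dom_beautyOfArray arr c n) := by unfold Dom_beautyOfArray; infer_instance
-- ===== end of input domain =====

-- B replaces A's naive branching recursion by the same recurrence with a memo dictionary
-- (top-down dynamic programming), evaluating each (array, n) state at most once.


-- ===== PORT A =====
-- Fuel bound: an upper bound on the recursion depth from state (arr, n); the fuel parameter is
-- a totality guard only (it never runs out on the calls the top-level entry makes).
def pvFuel (a : List Int) (m : Int) : Nat := (a.length + 1) * (a.length + 1) + m.toNat + 1

-- Literal port of A.  'if n ≤ 0' instead of Python's 'if n == 0' and the fuel-exhaustion /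
-- 'none' arms are totality guards only: for every n < 0 or n > len(arr) the Python recursion
-- raises IndexError (outside Pre_), and fuel never runs out (pvFuel bounds the depth).
def beautyOfArrayFuel : Nat → List Int → Int → Int → Int
  | 0, _, _, _ => 0
  | fuel + 1, arr, c, n =>
    if n ≤ 0 then 0
    else
      match PySem.List.pyGet? arr (n - 1) with
      | none => 0  -- Python: IndexError (outside Pre_)
      | some v =>
        if v = n then 1 + beautyOfArrayFuel fuel arr c (n - 1)
        else
          match PySem.List.pop? arr (n - 1) with
          | none => 0  -- unreachable: pyGet? succeeded at the same index
          | some r =>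
            max (beautyOfArrayFuel fuel arr c (n - 1))
                (beautyOfArrayFuel fuel r.2 c (r.2.length : Int))

def beautyOfArray (arr : List Int) (c : Int) (n : Int) : Int :=
  beautyOfArrayFuel (pvFuel arr n) arr c n

-- ===== PORT B =====
-- B's helper: the same recurrence with a memo dictionary threaded through (top-down DP).
-- The fuel parameter is the same totality guard as in port A.
def bGoFuel : Nat → List Int → Int → PySem.Dict (List Int × Int) Int →
    Int × PySem.Dict (List Int × Int) Int
  | 0, _, _, cache => (0, cache)
  | fuel + 1, a, m, cache =>
    if m ≤ 0 then (0, cache)  -- Python B: 'if m == 0'; m < 0 raises in Python (outside Pre_)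
    else
      match cache.get? (a, m) with
      | some hit => (hit, cache)
      | none =>
        match PySem.List.pyGet? a (m - 1) with
        | none => (0, cache)  -- Python: IndexError (outside Pre_)
        | some v =>
          if v = m then
            let p := bGoFuel fuel a (m - 1) cache
            let res := 1 + p.1
            (res, p.2.insert (a, m) res)
          else
            let a2 := PySem.List.slice a none (some (m - 1)) ++ PySem.List.slice a (some m) none
            let p1 := bGoFuel fuel a (m - 1) cache
            let p2 := bGoFuel fuel a2 (a2.length : Int) p1.2
            let res := max p1.1 p2.1
            (res, p2.2.insert (a, m) res)

def beautyOfArray_alt (arr : List Int) (c : Int) (n : Int) : Int :=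
  (bGoFuel (pvFuel arr n) arr n PySem.Dict.empty).1

-- ===== PRECONDITION & SPEC =====
-- Pre_: exactly the inputs on which Python A returns (n > len(arr) is an immediate IndexError
-- and every n < 0 eventually reaches an out-of-range index and raises).
def Pre_beautyOfArray (arr : List Int) (c : Int) (n : Int) : Prop :=
  0 ≤ n ∧ n ≤ (arr.length : Int)
instance (arr : List Int) (c : Int) (n : Int) : Decidable (Pre_beautyOfArray arr c n) := by
  unfold Pre_beautyOfArray; infer_instance

def pvWitness_beautyOfArray : List Int × Int × Int := ([4, 7, 2], 0, 3)

def Spec_beautyOfArray (arr : List Int) (c : Int) (n : Int) (out : Int) : Prop := out = beautyOfArray_alt arr c n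
instance (arr : List Int) (c : Int) (n : Int) (out : Int) : Decidable (Spec_beautyOfArray arr c n out) := by unfold Spec_beautyOfArray; infer_instance

-- ===== CLAIM (what is proved, stated in full; the proofs are below) =====
def Claim_equal_beautyOfArray : Prop := ∀ (arr : List Int) (c : Int) (n : Int), Dom_beautyOfArray arr c n → Pre_beautyOfArray arr c n → Spec_beautyOfArray arr c n (beautyOfArray arr c n)

-- ===== LEMMAS AND PROOFS =====

-- Index facts from a successful pyGet?.
theorem pvInRange_of_pyGet?_some {a : List Int} {i : Int} {v : Int}
    (h : PySem.List.pyGet? a i = some v) : -(a.length : Int) ≤ i ∧ i < (a.length : Int) := by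
  by_contra hc
  rw [(PySem.List.pyGet?_eq_none_iff a i).2 (by unfold PySem.Raise.InRange; exact hc)] at h
  simp at h

-- The fueled A-port is fuel-irrelevant above the pvFuel bound.
theorem beautyOfArrayFuel_adequate (c : Int) :
    ∀ (fuel fuel' : Nat) (a : List Int) (m : Int), pvFuel a m ≤ fuel → pvFuel a m ≤ fuel' →
      beautyOfArrayFuel fuel a c m = beautyOfArrayFuel fuel' a c m := by
  intro fuel
  induction fuel with
  | zero => intro fuel' a m h _; exact absurd h (by unfold pvFuel; omega)
  | succ f ih =>
    intro fuel' a m h h'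
    match fuel', h' with
    | f' + 1, h' =>
      simp only [beautyOfArrayFuel]
      by_cases hm : m ≤ 0
      · simp only [if_pos hm]
      · simp only [if_neg hm]
        cases hg : PySem.List.pyGet? a (m - 1) with
        | none => rfl
        | some v =>
          have hbnd := pvInRange_of_pyGet?_some hg
          have hsub : pvFuel a (m - 1) ≤ f ∧ pvFuel a (m - 1) ≤ f' := by
            unfold pvFuel at h h' ⊢; omega
          by_cases hv : v = m
          · simp only [if_pos hv, ih f' a (m - 1) hsub.1 hsub.2]
          · simp only [if_neg hv]
            cases hp : PySem.List.pop? a (m - 1) with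
            | none => rfl
            | some r =>
              have hlen := PySem.List.length_of_pop?_eq_some a hp
              have hmul : (a.length + 1) * (a.length + 1) =
                  (r.2.length + 1) * (r.2.length + 1) + 2 * r.2.length + 3 := by
                have h2 : a.length + 1 = r.2.length + 2 := by omega
                rw [h2]; ring
              have hsub2 : pvFuel r.2 (r.2.length : Int) ≤ f ∧
                  pvFuel r.2 (r.2.length : Int) ≤ f' := by
                unfold pvFuel at h h' ⊢
                simp only [Int.toNat_natCast]
                omega
              simp only [ih f' a (m - 1) hsub.1 hsub.2,
                ih f' r.2 (r.2.length : Int) hsub2.1 hsub2.2]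

-- The WF-style unfolding equation of port A's entry point.
theorem beautyOfArray_eq (a : List Int) (c : Int) (m : Int) :
    beautyOfArray a c m =
      if m ≤ 0 then 0
      else
        match PySem.List.pyGet? a (m - 1) with
        | none => 0
        | some v =>
          if v = m then 1 + beautyOfArray a c (m - 1)
          else
            match PySem.List.pop? a (m - 1) with
            | none => 0
            | some r =>
              max (beautyOfArray a c (m - 1)) (beautyOfArray r.2 c (r.2.length : Int)) := by
  unfold beautyOfArray
  have h1 : pvFuel a m = ((a.length + 1) * (a.length + 1) + m.toNat) + 1 := by
    unfold pvFuel; omega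
  rw [h1]
  simp only [beautyOfArrayFuel]
  by_cases hm : m ≤ 0
  · simp only [if_pos hm]
  · simp only [if_neg hm]
    cases hg : PySem.List.pyGet? a (m - 1) with
    | none => rfl
    | some v =>
      have hbnd := pvInRange_of_pyGet?_some hg
      have e1 : beautyOfArrayFuel ((a.length + 1) * (a.length + 1) + m.toNat) a c (m - 1) =
          beautyOfArrayFuel (pvFuel a (m - 1)) a c (m - 1) :=
        beautyOfArrayFuel_adequate c _ _ a (m - 1) (by unfold pvFuel; omega) (le_refl _)
      by_cases hv : v = m
      · simp only [if_pos hv, e1]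
      · simp only [if_neg hv]
        cases hp : PySem.List.pop? a (m - 1) with
        | none => rfl
        | some r =>
          have hlen := PySem.List.length_of_pop?_eq_some a hp
          have hmul : (a.length + 1) * (a.length + 1) =
              (r.2.length + 1) * (r.2.length + 1) + 2 * r.2.length + 3 := by
            have h2 : a.length + 1 = r.2.length + 2 := by omega
            rw [h2]; ring
          have e2 : beautyOfArrayFuel ((a.length + 1) * (a.length + 1) + m.toNat) r.2 c
              (r.2.length : Int) = beautyOfArrayFuel (pvFuel r.2 (r.2.length : Int)) r.2 c
              (r.2.length : Int) :=
            beautyOfArrayFuel_adequate c _ _ r.2 (r.2.length : Int)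
              (by unfold pvFuel; simp only [Int.toNat_natCast]; omega) (le_refl _)
          simp only [e1, e2]

-- Cache invariant: every memoised entry is the value of A's recursion at that state.
def CacheOK (c : Int) (cache : PySem.Dict (List Int × Int) Int) : Prop :=
  ∀ (a : List Int) (m : Int) (v : Int), cache.get? (a, m) = some v → v = beautyOfArray a c m

theorem bGo_correct (c : Int) :
    ∀ (fuel : Nat) (a : List Int) (m : Int) (cache : PySem.Dict (List Int × Int) Int),
      pvFuel a m ≤ fuel → CacheOK c cache →
      (bGoFuel fuel a m cache).1 = beautyOfArray a c m ∧ CacheOK c (bGoFuel fuel a m cache).2 := by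
  intro fuel
  induction fuel with
  | zero => intro a m cache h _; exact absurd h (by unfold pvFuel; omega)
  | succ f ih =>
    intro a m cache hfuel hinv
    simp only [bGoFuel]
    by_cases hm : m ≤ 0
    · simp only [if_pos hm]
      refine ⟨?_, hinv⟩
      rw [beautyOfArray_eq, if_pos hm]
    · simp only [if_neg hm]
      cases hc : cache.get? (a, m) with
      | some hit => exact ⟨hinv a m hit hc, hinv⟩
      | none =>
        simp only
        cases hg : PySem.List.pyGet? a (m - 1) with
        | none =>
            refine ⟨?_, hinv⟩
            rw [beautyOfArray_eq, if_neg hm]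
            simp only [hg]
        | some v =>
            have hbnd := pvInRange_of_pyGet?_some hg
            have hsub : pvFuel a (m - 1) ≤ f := by unfold pvFuel at hfuel ⊢; omega
            by_cases hv : v = m
            · simp only [if_pos hv]
              have ihm := ih a (m - 1) cache hsub hinv
              have hA : beautyOfArray a c m = 1 + beautyOfArray a c (m - 1) := by
                rw [beautyOfArray_eq, if_neg hm]; simp only [hg, if_pos hv]
              refine ⟨?_, ?_⟩
              · show 1 + (bGoFuel f a (m - 1) cache).1 = beautyOfArray a c m
                rw [ihm.1, hA]
              · show CacheOK c (((bGoFuel f a (m - 1) cache).2).insert (a, m)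
                  (1 + (bGoFuel f a (m - 1) cache).1))
                intro a' m' w hw
                rw [PySem.Dict.get?_insert] at hw
                by_cases hk : ((a', m') : List Int × Int) = (a, m)
                · rw [if_pos hk] at hw
                  injection hw with hw'
                  obtain ⟨ha', hm'⟩ := Prod.mk.injEq .. ▸ hk
                  subst ha'; subst hm'
                  rw [← hw', ihm.1, hA]
                · rw [if_neg hk] at hw
                  exact ihm.2 a' m' w hw
            · simp only [if_neg hv]
              -- the deleted-element list: B's slices equal A's pop
              have ha2 : PySem.List.slice a none (some (m - 1)) ++
                  PySem.List.slice a (some m) none = a.eraseIdx (m - 1).toNat := by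
                rw [PySem.List.slice_to a (by omega), PySem.List.slice_from a (by omega),
                  List.eraseIdx_eq_take_drop_succ]
                have : (m - 1).toNat + 1 = m.toNat := by omega
                rw [this]
              have hpop : PySem.List.pop? a (m - 1) =
                  some (a[(m - 1).toNat]'(by omega), a.eraseIdx (m - 1).toNat) := by
                have := PySem.List.pop?_natCast a (m - 1).toNat (by omega)
                rwa [Int.toNat_of_nonneg (by omega : (0:Int) ≤ m - 1)] at this
              have hlen : (a.eraseIdx (m - 1).toNat).length + 1 = a.length :=
                PySem.List.length_of_pop?_eq_some a hpop
              have hA : beautyOfArray a c m =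
                  max (beautyOfArray a c (m - 1))
                      (beautyOfArray (a.eraseIdx (m - 1).toNat) c
                        ((a.eraseIdx (m - 1).toNat).length : Int)) := by
                rw [beautyOfArray_eq, if_neg hm]
                simp only [hg, if_neg hv, hpop]
              have hmul : (a.length + 1) * (a.length + 1) =
                  ((a.eraseIdx (m - 1).toNat).length + 1) * ((a.eraseIdx (m - 1).toNat).length + 1) +
                    2 * (a.eraseIdx (m - 1).toNat).length + 3 := by
                have h2 : a.length + 1 = (a.eraseIdx (m - 1).toNat).length + 2 := by omega
                rw [h2]; ring
              have hsub2 : pvFuel (a.eraseIdx (m - 1).toNat)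
                  ((a.eraseIdx (m - 1).toNat).length : Int) ≤ f := by
                unfold pvFuel at hfuel ⊢
                simp only [Int.toNat_natCast]
                omega
              have ih1 := ih a (m - 1) cache hsub hinv
              have ih2 := ih (a.eraseIdx (m - 1).toNat)
                ((a.eraseIdx (m - 1).toNat).length : Int) (bGoFuel f a (m - 1) cache).2
                hsub2 ih1.2
              rw [show (PySem.List.slice a none (some (m - 1)) ++
                  PySem.List.slice a (some m) none) = a.eraseIdx (m - 1).toNat from ha2]
              refine ⟨?_, ?_⟩
              · show max (bGoFuel f a (m - 1) cache).1
                  (bGoFuel f (a.eraseIdx (m - 1).toNat) ((a.eraseIdx (m - 1).toNat).length : Int)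
                    (bGoFuel f a (m - 1) cache).2).1 = beautyOfArray a c m
                rw [ih1.1, ih2.1, hA]
              · show CacheOK c ((bGoFuel f (a.eraseIdx (m - 1).toNat)
                    ((a.eraseIdx (m - 1).toNat).length : Int) (bGoFuel f a (m - 1) cache).2).2.insert
                    (a, m) (max (bGoFuel f a (m - 1) cache).1
                      (bGoFuel f (a.eraseIdx (m - 1).toNat)
                        ((a.eraseIdx (m - 1).toNat).length : Int) (bGoFuel f a (m - 1) cache).2).1))
                intro a' m' w hw
                rw [PySem.Dict.get?_insert] at hw
                by_cases hk : ((a', m') : List Int × Int) = (a, m)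
                · rw [if_pos hk] at hw
                  injection hw with hw'
                  obtain ⟨ha', hm'⟩ := Prod.mk.injEq .. ▸ hk
                  subst ha'; subst hm'
                  rw [← hw', ih1.1, ih2.1, hA]
                · rw [if_neg hk] at hw
                  exact ih2.2 a' m' w hw

-- ===== VERDICT (by name: the statement is the Claim_ definition above) =====
theorem beautyOfArray_spec : Claim_equal_beautyOfArray := by
  intro arr c n _ _
  unfold Spec_beautyOfArray beautyOfArray_alt
  exact (bGo_correct c (pvFuel arr n) arr n PySem.Dict.empty (le_refl _)
    (fun a m v h => by simp [PySem.Dict.get?_empty] at h)).1.symm
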